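-- pv_equiv track=rewrite | github.com/okfde/offenerhaushalt-daten | schleswig-holstein/main.py | jsonify_csv
-- ===== SOURCE A (Python) =====
-- def jsonify_csv(reader):
--     collected = {}
--     had_dash = False
--     current_number = 0
--     for line in reader:
--         if line[0] != "":
--             current_number = line[0]
--             title = line[1].strip()
--             if title.endswith("-"):
--                 had_dash = True
--                 title = title[:-1]
--             else:
--                 had_dash = False
--             collected[current_number] = title
--             continue
--
--         if had_dash:
--             collected[current_number] += line[1]
--         else:
--             collected[current_number] += " " + line[1]
--     return collected
-- ===== SOURCE B (Python) =====
-- def jsonify_csv(reader):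
--     out = {}
--     i, n = 0, len(reader)
--     while i < n:
--         line = reader[i]
--         num = line[0]
--         title = line[1].strip()
--         dash = title.endswith("-")
--         if dash:
--             title = title[:-1]
--         i += 1
--         parts = []
--         while i < n and reader[i][0] == "":
--             parts.append(reader[i][1])
--             i += 1
--         sep = "" if dash else " "
--         out[num] = title + "".join(sep + p for p in parts)
--     return out
-- ===== Notes on version B (the rewrite author's own statement) =====
-- stated objective: alternative
-- what changed: B replaces A's single stateful fold (dict + had_dash + current_number threaded across rows) by a grouping scan: each header row grabs its whole run of continuation rows at once and the record string is built in one join, so no flags survive between records.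
import Mathlib
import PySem

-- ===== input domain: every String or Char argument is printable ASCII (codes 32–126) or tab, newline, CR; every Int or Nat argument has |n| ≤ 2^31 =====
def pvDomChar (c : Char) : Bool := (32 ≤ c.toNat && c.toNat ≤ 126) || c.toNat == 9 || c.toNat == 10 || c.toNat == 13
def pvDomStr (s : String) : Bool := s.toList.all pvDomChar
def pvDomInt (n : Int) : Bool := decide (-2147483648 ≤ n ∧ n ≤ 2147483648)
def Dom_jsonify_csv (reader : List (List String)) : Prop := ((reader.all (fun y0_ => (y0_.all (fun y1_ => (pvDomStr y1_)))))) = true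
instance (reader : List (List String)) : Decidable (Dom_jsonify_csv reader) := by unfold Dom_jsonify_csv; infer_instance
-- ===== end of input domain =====

-- B regroups the rows record-by-record (header + its run of continuation rows, one join) instead of
-- A's single fold threading dict/had_dash/current_number state; same cost, no speed claim.

-- ===== PORT A =====
-- A's loop body; line[0]/line[1] are totalized with getD "" (Pre_ guarantees 2 ≤ length so they
-- agree with Python's raising indexing), and the initial current_number = 0 (an int key no string
-- key can equal) is represented by ""; Pre_'s first-row-is-header condition means it is never read.
def jsonify_csv_step (st : PySem.Dict String String × Bool × String) (line : List String) :
    PySem.Dict String String × Bool × String :=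
  let collected := st.1
  let had_dash := st.2.1
  let current := st.2.2
  if line.getD 0 "" ≠ "" then
    let current' := line.getD 0 ""
    let title := PySem.Str.strip (line.getD 1 "")
    if PySem.Str.endswith title "-" then
      (collected.insert current' (PySem.Str.slice title none (some (-1))), true, current')
    else
      (collected.insert current' title, false, current')
  else
    if had_dash then
      (collected.insert current (collected.getD current "" ++ line.getD 1 ""), had_dash, current)
    else
      (collected.insert current (collected.getD current "" ++ (" " ++ line.getD 1 "")), had_dash, current)

def jsonify_csv (reader : List (List String)) : List (String × String) :=
  ((reader.foldl jsonify_csv_step (PySem.Dict.empty, false, ""))).1.items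

-- ===== PORT B =====
-- B's outer while loop: one recursive step per record (header row + its continuation run).
def jsonify_csv_go (out : PySem.Dict String String) : List (List String) → PySem.Dict String String
  | [] => out
  | line :: rest =>
    let num := line.getD 0 ""
    let title0 := PySem.Str.strip (line.getD 1 "")
    let dash := PySem.Str.endswith title0 "-"
    let title := if dash then PySem.Str.slice title0 none (some (-1)) else title0
    let parts := (rest.takeWhile (fun l => l.getD 0 "" == "")).map (fun l => l.getD 1 "")
    let sep := if dash then "" else " "
    jsonify_csv_go (out.insert num (title ++ PySem.Str.join "" (parts.map (fun p => sep ++ p))))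
      (rest.dropWhile (fun l => l.getD 0 "" == ""))
termination_by l => l.length
decreasing_by
  simpa using Nat.lt_succ_of_le (List.length_dropWhile_le _ _)

def jsonify_csv_alt (reader : List (List String)) : List (String × String) :=
  (jsonify_csv_go PySem.Dict.empty reader).items

-- ===== PRECONDITION & SPEC =====
-- Pre_ excludes exactly the inputs where the Python A raises: a row shorter than 2 entries
-- (IndexError on line[0]/line[1]) and a continuation row before any header row, i.e. a first row
-- whose first entry is "" (KeyError on the int default key 0).
def Pre_jsonify_csv (reader : List (List String)) : Prop :=
  (∀ l ∈ reader, 2 ≤ l.length) ∧ (∀ l ∈ reader.take 1, l.getD 0 "" ≠ "")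
instance (reader : List (List String)) : Decidable (Pre_jsonify_csv reader) := by
  unfold Pre_jsonify_csv; infer_instance

def pvWitness_jsonify_csv : List (List String) :=
  [["1", " Foo- "], ["", "bar"], ["2", " baz "], ["", "qux"], ["1", "re"]]

def Spec_jsonify_csv (reader : List (List String)) (out : List (String × String)) : Prop := out = jsonify_csv_alt reader
instance (reader : List (List String)) (out : List (String × String)) : Decidable (Spec_jsonify_csv reader out) := by unfold Spec_jsonify_csv; infer_instance

-- ===== CLAIM (what is proved, stated in full; the proofs are below) =====
def Claim_equal_jsonify_csv : Prop := ∀ (reader : List (List String)), Dom_jsonify_csv reader → Pre_jsonify_csv reader → Spec_jsonify_csv reader (jsonify_csv reader)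

-- ===== LEMMAS AND PROOFS =====

-- join with empty separator is concatenation of the pieces (specific form both ports build).
lemma chars_join_nil_eq_flatten (ps : List (List Char)) : PySem.Chars.join [] ps = ps.flatten := by
  simp only [PySem.Chars.join, List.intercalate]
  induction ps with
  | nil => rfl
  | cons q qs ih => cases qs <;> simp_all [List.intersperse]

lemma str_join_empty_nil : PySem.Str.join "" [] = "" := by
  simp [PySem.Str.join]

lemma str_join_empty_cons (p : String) (ps : List String) :
    PySem.Str.join "" (p :: ps) = p ++ PySem.Str.join "" ps := by
  simp [PySem.Str.join, chars_join_nil_eq_flatten, String.ofList_append]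

-- A's step on a header row, spelled out.
lemma step_header (st : PySem.Dict String String × Bool × String) (line : List String)
    (h0 : line.getD 0 "" ≠ "") :
    jsonify_csv_step st line
      = (st.1.insert (line.getD 0 "")
          (if PySem.Str.endswith (PySem.Str.strip (line.getD 1 "")) "-" then
            PySem.Str.slice (PySem.Str.strip (line.getD 1 "")) none (some (-1))
          else PySem.Str.strip (line.getD 1 "")),
         PySem.Str.endswith (PySem.Str.strip (line.getD 1 "")) "-", line.getD 0 "") := by
  simp only [jsonify_csv_step]
  rw [if_pos h0]
  cases hdash : PySem.Str.endswith (PySem.Str.strip (line.getD 1 "")) "-" <;> simp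

-- A's fold over a run of continuation rows only grows the entry at the current key.
lemma foldl_step_cont (cs : List (List String)) (hcs : ∀ l ∈ cs, l.getD 0 "" = "") :
    ∀ (d : PySem.Dict String String) (num t : String) (dash : Bool),
    cs.foldl jsonify_csv_step (d.insert num t, dash, num)
      = (d.insert num (t ++ PySem.Str.join ""
          (cs.map (fun l => (if dash then "" else " ") ++ l.getD 1 ""))), dash, num) := by
  induction cs with
  | nil => intro d num t dash; simp [str_join_empty_nil]
  | cons c cs ih =>
    intro d num t dash
    have h0 : c.getD 0 "" = "" := hcs c (by simp)
    have hrest : ∀ l ∈ cs, l.getD 0 "" = "" := fun l hl => hcs l (by simp [hl])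
    have hstep : jsonify_csv_step (d.insert num t, dash, num) c
        = (d.insert num (t ++ ((if dash then "" else " ") ++ c.getD 1 "")), dash, num) := by
      simp only [jsonify_csv_step]
      rw [if_neg (by simpa using h0)]
      cases dash <;>
        simp [PySem.Dict.getD_insert_self, PySem.Dict.insert_insert_self]
    rw [List.foldl_cons, hstep, ih hrest]
    simp [str_join_empty_cons, String.append_assoc]

-- A's fold equals B's record recursion whenever the first row (if any) is a header row.
lemma fold_eq_go : ∀ (reader : List (List String)) (d : PySem.Dict String String),
    (∀ l ∈ reader.take 1, l.getD 0 "" ≠ "") → ∀ (hd : Bool) (cur : String),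
    (reader.foldl jsonify_csv_step (d, hd, cur)).1 = jsonify_csv_go d reader
  | [], d => by intro _ hd cur; simp [jsonify_csv_go]
  | line :: rest, d => by
    intro hhead hd cur
    have h0 : line.getD 0 "" ≠ "" := hhead line (by simp)
    have htk : ∀ l ∈ rest.takeWhile (fun l => l.getD 0 "" == ""), l.getD 0 "" = "" :=
      fun l hl => by simpa using List.mem_takeWhile_imp hl
    have hdw : ∀ l ∈ (rest.dropWhile (fun l => l.getD 0 "" == "")).take 1, l.getD 0 "" ≠ "" := by
      cases hcase : rest.dropWhile (fun l => l.getD 0 "" == "") with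
      | nil => simp
      | cons l' t =>
        have hne : rest.dropWhile (fun l => l.getD 0 "" == "") ≠ [] := by
          rw [hcase]; exact List.cons_ne_nil _ _
        have := List.head_dropWhile_not (l := rest) (p := fun l => l.getD 0 "" == "") hne
        simp_all [List.head_cons]
    have hih := fold_eq_go (rest.dropWhile (fun l => l.getD 0 "" == ""))
      (d.insert (line.getD 0 "")
        ((if PySem.Str.endswith (PySem.Str.strip (line.getD 1 "")) "-" then
            PySem.Str.slice (PySem.Str.strip (line.getD 1 "")) none (some (-1))
          else PySem.Str.strip (line.getD 1 "")) ++
         PySem.Str.join ""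
          ((rest.takeWhile (fun l => l.getD 0 "" == "")).map
            (fun l => (if PySem.Str.endswith (PySem.Str.strip (line.getD 1 "")) "-" then ""
                       else " ") ++ l.getD 1 ""))))
      hdw (PySem.Str.endswith (PySem.Str.strip (line.getD 1 "")) "-") (line.getD 0 "")
    rw [List.foldl_cons, step_header _ _ h0, ← List.takeWhile_append_dropWhile
        (p := fun l : List String => l.getD 0 "" == "") (l := rest),
      List.foldl_append, foldl_step_cont _ htk, List.takeWhile_append_dropWhile, hih]
    conv_rhs => rw [jsonify_csv_go]
    simp [List.map_map, Function.comp_def]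
termination_by reader => reader.length
decreasing_by
  simpa using Nat.lt_succ_of_le (List.length_dropWhile_le _ _)

-- ===== VERDICT (by name: the statement is the Claim_ definition above) =====
theorem jsonify_csv_spec : Claim_equal_jsonify_csv := by
  intro reader _ hpre
  unfold Spec_jsonify_csv jsonify_csv jsonify_csv_alt
  rw [fold_eq_go reader PySem.Dict.empty hpre.2 false ""]
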